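-- pv_equiv track=rewrite | github.com/evlev777/BELHARD-Courses | Homework_4/lesson6_8.py | search_country
-- ===== SOURCE A (Python) =====
-- def search_country(city):
--     country_dict = {
--         'Belarus': ['MINSK', 'GOMEL', 'GRODNO', 'BREST', 'MOGILEV', 'VITEBSK'],
--         'Russia': ['MOSKOW', 'SAINT-PETERBURG', 'KAZAN', 'VLADIVOSTOK'],
--         'USA': ['WASHINGTON', 'CAROLINA', 'MIAMI', 'FLORIDA', 'NEW-YORK']
--     }
--
--     for cities_list in country_dict:
--         if city.upper() in country_dict[cities_list]:
--             return cities_list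
--     else:
--         return 'Такого города нет'
-- ===== SOURCE B (Python) =====
-- _TABLE = [
--     ('BREST', 'Belarus'), ('CAROLINA', 'USA'), ('FLORIDA', 'USA'),
--     ('GOMEL', 'Belarus'), ('GRODNO', 'Belarus'), ('KAZAN', 'Russia'),
--     ('MIAMI', 'USA'), ('MINSK', 'Belarus'), ('MOGILEV', 'Belarus'),
--     ('MOSKOW', 'Russia'), ('NEW-YORK', 'USA'), ('SAINT-PETERBURG', 'Russia'),
--     ('VITEBSK', 'Belarus'), ('VLADIVOSTOK', 'Russia'), ('WASHINGTON', 'USA'),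
-- ]
--
-- def _find(u):
--     lo, hi = 0, len(_TABLE)
--     while lo < hi:
--         mid = (lo + hi) // 2
--         if _TABLE[mid][0] < u:
--             lo = mid + 1
--         else:
--             hi = mid
--     if lo < len(_TABLE) and _TABLE[lo][0] == u:
--         return _TABLE[lo][1]
--     return 'Такого города нет'
--
-- def search_country(city):
--     return _find(city.upper())
-- ===== Notes on version B (the rewrite author's own statement) =====
-- stated objective: alternative
-- what changed: Replaces A's per-country linear membership scan with a pre-sorted city table searched by a hand-written binary search (lower-bound loop) followed by a single equality check.
import Mathlib
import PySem

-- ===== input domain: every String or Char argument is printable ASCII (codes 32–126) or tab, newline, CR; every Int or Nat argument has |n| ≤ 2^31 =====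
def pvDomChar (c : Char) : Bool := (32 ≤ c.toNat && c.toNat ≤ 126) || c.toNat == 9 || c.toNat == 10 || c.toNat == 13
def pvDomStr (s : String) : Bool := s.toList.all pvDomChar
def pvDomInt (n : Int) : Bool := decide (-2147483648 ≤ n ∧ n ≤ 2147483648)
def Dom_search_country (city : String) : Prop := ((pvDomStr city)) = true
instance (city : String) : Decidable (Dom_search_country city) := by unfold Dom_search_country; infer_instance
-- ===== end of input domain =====

set_option maxRecDepth 4000


-- B replaces A's per-country membership scan with a sorted city table and a hand-written
-- binary search (alternative algorithm); return value only.

-- ===== PORT A =====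
-- the dict literal, as an insertion-ordered association list
def pvCountryDict : List (String × List String) :=
  [("Belarus", ["MINSK", "GOMEL", "GRODNO", "BREST", "MOGILEV", "VITEBSK"]),
   ("Russia", ["MOSKOW", "SAINT-PETERBURG", "KAZAN", "VLADIVOSTOK"]),
   ("USA", ["WASHINGTON", "CAROLINA", "MIAMI", "FLORIDA", "NEW-YORK"])]

-- A's for-loop over the dict keys with early return
def pvALoop (u : String) : List (String × List String) → String
  | [] => "Такого города нет"
  | (k, v) :: rest => if v.contains u then k else pvALoop u rest

def search_country (city : String) : String :=
  pvALoop (PySem.Str.upper city) pvCountryDict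

-- ===== PORT B =====
-- B's module-level sorted table _TABLE
def pvTable : List (String × String) :=
  [("BREST", "Belarus"), ("CAROLINA", "USA"), ("FLORIDA", "USA"),
   ("GOMEL", "Belarus"), ("GRODNO", "Belarus"), ("KAZAN", "Russia"),
   ("MIAMI", "USA"), ("MINSK", "Belarus"), ("MOGILEV", "Belarus"),
   ("MOSKOW", "Russia"), ("NEW-YORK", "USA"), ("SAINT-PETERBURG", "Russia"),
   ("VITEBSK", "Belarus"), ("VLADIVOSTOK", "Russia"), ("WASHINGTON", "USA")]

-- the while-loop of _find, made total with a fuel bound (≥ hi - lo, so it never runs out)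
def pvBLoop (u : String) : Nat → Nat → Nat → Nat
  | 0, lo, _ => lo
  | fuel + 1, lo, hi =>
    if lo < hi then
      let mid := (lo + hi) / 2
      -- Python string "<" is code-point lexicographic; compared here on toList (exact)
      if (pvTable.getD mid ("", "")).1.toList < u.toList then pvBLoop u fuel (mid + 1) hi
      else pvBLoop u fuel lo mid
    else lo

-- _find(u): binary search then final check
def pvBFind (u : String) : String :=
  let lo := pvBLoop u pvTable.length 0 pvTable.length
  if lo < pvTable.length then
    if (pvTable.getD lo ("", "")).1 = u then (pvTable.getD lo ("", "")).2
    else "Такого города нет"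
  else "Такого города нет"

def search_country_alt (city : String) : String :=
  pvBFind (PySem.Str.upper city)

-- ===== PRECONDITION & SPEC =====
def Spec_search_country (city : String) (out : String) : Prop := out = search_country_alt city
instance (city : String) (out : String) : Decidable (Spec_search_country city out) := by unfold Spec_search_country; infer_instance

-- ===== CLAIM =====
def Claim_equal_search_country : Prop := ∀ (city : String), Dom_search_country city → Spec_search_country city (search_country city)

-- ===== LEMMAS AND PROOFS =====

-- if u is the key of no table entry, the final check of _find fails, whatever index the loop lands on
theorem pvBFind_notfound (u : String) (h : ∀ p ∈ pvTable, p.1 ≠ u) :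
    pvBFind u = "Такого города нет" := by
  unfold pvBFind
  set lo := pvBLoop u pvTable.length 0 pvTable.length with hlo
  by_cases hl : lo < pvTable.length
  · have hne : pvTable[lo].1 ≠ u := h _ (List.getElem_mem hl)
    simp [hl, hne]
  · simp [hl]

theorem pvKey (u : String) : pvALoop u pvCountryDict = pvBFind u := by
  by_cases h1 : u = "MINSK"
  · subst h1; decide
  by_cases h2 : u = "GOMEL"
  · subst h2; decide
  by_cases h3 : u = "GRODNO"
  · subst h3; decide
  by_cases h4 : u = "BREST"
  · subst h4; decide
  by_cases h5 : u = "MOGILEV"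
  · subst h5; decide
  by_cases h6 : u = "VITEBSK"
  · subst h6; decide
  by_cases h7 : u = "MOSKOW"
  · subst h7; decide
  by_cases h8 : u = "SAINT-PETERBURG"
  · subst h8; decide
  by_cases h9 : u = "KAZAN"
  · subst h9; decide
  by_cases h10 : u = "VLADIVOSTOK"
  · subst h10; decide
  by_cases h11 : u = "WASHINGTON"
  · subst h11; decide
  by_cases h12 : u = "CAROLINA"
  · subst h12; decide
  by_cases h13 : u = "MIAMI"
  · subst h13; decide
  by_cases h14 : u = "FLORIDA"
  · subst h14; decide
  by_cases h15 : u = "NEW-YORK"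
  · subst h15; decide
  rw [pvBFind_notfound u (by
    intro p hp
    simp [pvTable] at hp
    rcases hp with rfl|rfl|rfl|rfl|rfl|rfl|rfl|rfl|rfl|rfl|rfl|rfl|rfl|rfl|rfl <;>
      simp <;> first
        | exact Ne.symm h1 | exact Ne.symm h2 | exact Ne.symm h3 | exact Ne.symm h4
        | exact Ne.symm h5 | exact Ne.symm h6 | exact Ne.symm h7 | exact Ne.symm h8
        | exact Ne.symm h9 | exact Ne.symm h10 | exact Ne.symm h11 | exact Ne.symm h12
        | exact Ne.symm h13 | exact Ne.symm h14 | exact Ne.symm h15)]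
  simp [pvALoop, pvCountryDict, h1, h2, h3, h4, h5, h6, h7, h8, h9, h10, h11, h12, h13, h14, h15]

-- ===== VERDICT =====
theorem search_country_spec : Claim_equal_search_country := by
  intro city _
  unfold Spec_search_country search_country search_country_alt
  exact pvKey _
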